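-- pv_equiv track=rewrite | github.com/druvus/misc_scripts | ncbi_genome_assembly_info/fetch_taxonomy.py | select_assembly
-- ===== SOURCE A (Python) =====
-- from typing import List, Optional, Tuple, Dict
--
-- def select_assembly(candidates: List[Dict], preference: str, has_refseq_reference: bool) -> Optional[Dict]:
--     # Apply the hierarchy:
--     # 1. reference genome
--     reference = [asm for asm in candidates if asm.get('RefSeq_category') == 'reference genome']
--     if reference:
--         return reference[0]
--
--     # 2. representative genome
--     representative = [asm for asm in candidates if asm.get('RefSeq_category') == 'representative genome']
--     if representative:
--         return representative[0]
--
--     # 3. Assemblies that have a RefSeq counterpart (FtpPath_RefSeq)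
--     with_refseq_path = [asm for asm in candidates if asm.get('FtpPath_RefSeq')]
--     if with_refseq_path:
--         return with_refseq_path[0]
--
--     # 4. If genbank mode and we know there's a refseq reference-like assembly in the group,
--     #    we ideally pick a GCA that matches that group. If we're here, it means we didn't find
--     #    a direct counterpart, but we might still just pick from what we have.
--     # (This step is now less critical because we're pre-grouping.)
--
--     # 5. fallback: first available
--     if candidates:
--         return candidates[0]
--     return None
-- ===== SOURCE B (Python) =====
-- def select_assembly(candidates, preference, has_refseq_reference):
--     def rank(asm):
--         cat = asm.get('RefSeq_category')
--         if cat == 'reference genome':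
--             return 0
--         if cat == 'representative genome':
--             return 1
--         if asm.get('FtpPath_RefSeq'):
--             return 2
--         return 3
--     return min(candidates, key=rank, default=None)
-- ===== Notes on version B (the rewrite author's own statement) =====
-- stated objective: idiomatic
-- what changed: Replaces the four sequential filter-and-take-first scans with a single min(candidates, key=rank, default=None) over a 4-level priority rank, relying on min's first-minimum stability to reproduce the early-return order including the candidates[0] fallback and None on empty input.
import Mathlib
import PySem

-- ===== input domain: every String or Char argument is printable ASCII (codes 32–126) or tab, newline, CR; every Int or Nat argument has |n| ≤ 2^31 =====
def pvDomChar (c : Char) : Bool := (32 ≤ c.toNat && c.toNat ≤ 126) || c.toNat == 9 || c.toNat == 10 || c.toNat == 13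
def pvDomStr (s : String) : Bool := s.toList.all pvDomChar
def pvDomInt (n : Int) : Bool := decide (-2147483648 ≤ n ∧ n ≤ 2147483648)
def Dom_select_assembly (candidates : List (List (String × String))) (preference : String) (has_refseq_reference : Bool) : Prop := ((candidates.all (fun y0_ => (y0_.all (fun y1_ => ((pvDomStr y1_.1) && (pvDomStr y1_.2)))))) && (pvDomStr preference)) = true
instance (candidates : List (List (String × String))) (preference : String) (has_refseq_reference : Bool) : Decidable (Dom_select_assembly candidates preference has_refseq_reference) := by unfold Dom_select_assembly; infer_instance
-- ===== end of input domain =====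

-- B replaces A's four sequential filter scans by one stable min over a 4-level rank key (idiomatic, single pass).

-- ===== PORT A =====
-- A's three comprehension tests (asm.get('RefSeq_category') == 'reference genome', etc.)
def pvQ0 (asm : List (String × String)) : Bool := (PySem.Dict.mk asm).get? "RefSeq_category" == some "reference genome"
def pvQ1 (asm : List (String × String)) : Bool := (PySem.Dict.mk asm).get? "RefSeq_category" == some "representative genome"
def pvQT (asm : List (String × String)) : Bool := ((PySem.Dict.mk asm).get? "FtpPath_RefSeq").getD "" != ""

def select_assembly (candidates : List (List (String × String))) (preference : String) (has_refseq_reference : Bool) : Option (List (String × String)) :=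
  let reference := candidates.filter pvQ0
  match reference with
  | r :: _ => some r
  | [] =>
    let representative := candidates.filter pvQ1
    match representative with
    | r :: _ => some r
    | [] =>
      let with_refseq_path := candidates.filter pvQT
      match with_refseq_path with
      | r :: _ => some r
      | [] =>
        match candidates with
        | r :: _ => some r
        | [] => none

-- ===== PORT B =====
-- Source B's nested rank function (cat computed once, then the truthiness test)
def pvRank (asm : List (String × String)) : Nat :=
  let cat := (PySem.Dict.mk asm).get? "RefSeq_category"
  if cat == some "reference genome" then 0
  else if cat == some "representative genome" then 1
  else if ((PySem.Dict.mk asm).get? "FtpPath_RefSeq").getD "" != "" then 2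
  else 3

def select_assembly_alt (candidates : List (List (String × String))) (preference : String) (has_refseq_reference : Bool) : Option (List (String × String)) :=
  PySem.List.min? candidates pvRank

-- ===== PRECONDITION & SPEC =====
def Spec_select_assembly (candidates : List (List (String × String))) (preference : String) (has_refseq_reference : Bool) (out : Option (List (String × String))) : Prop := out = select_assembly_alt candidates preference has_refseq_reference
instance (candidates : List (List (String × String))) (preference : String) (has_refseq_reference : Bool) (out : Option (List (String × String))) : Decidable (Spec_select_assembly candidates preference has_refseq_reference out) := by unfold Spec_select_assembly; infer_instance

-- ===== CLAIM (what is proved, stated in full; the proofs are below) =====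
def Claim_equal_select_assembly : Prop := ∀ (candidates : List (List (String × String))) (preference : String) (has_refseq_reference : Bool), Dom_select_assembly candidates preference has_refseq_reference → Spec_select_assembly candidates preference has_refseq_reference (select_assembly candidates preference has_refseq_reference)

-- ===== LEMMAS AND PROOFS =====

lemma pvRank_eq0 {a : List (String × String)} (h : pvQ0 a = true) : pvRank a = 0 := by
  simp [pvQ0] at h; simp [pvRank, h]

lemma pvRank_eq1 {a : List (String × String)} (h : pvQ1 a = true) : pvRank a = 1 := by
  simp [pvQ1] at h; simp [pvRank, h]

lemma pvRank_eq2 {a : List (String × String)} (h0 : pvQ0 a = false) (h1 : pvQ1 a = false)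
    (hT : pvQT a = true) : pvRank a = 2 := by
  simp [pvQ0] at h0; simp [pvQ1] at h1; simp [pvQT] at hT
  simp [pvRank, h0, h1, hT]

lemma pvRank_eq3 {a : List (String × String)} (h0 : pvQ0 a = false) (h1 : pvQ1 a = false)
    (hT : pvQT a = false) : pvRank a = 3 := by
  simp [pvQ0] at h0; simp [pvQ1] at h1; simp [pvQT] at hT
  simp [pvRank, h0, h1, hT]

lemma pvRank_ge1 {a : List (String × String)} (h0 : pvQ0 a = false) : 1 ≤ pvRank a := by
  simp [pvQ0] at h0; simp [pvRank, h0]; split_ifs <;> omega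

lemma pvRank_ge2 {a : List (String × String)} (h0 : pvQ0 a = false) (h1 : pvQ1 a = false) :
    2 ≤ pvRank a := by
  simp [pvQ0] at h0; simp [pvQ1] at h1; simp [pvRank, h0, h1]; split_ifs <;> omega

lemma pv_min?_cons : ∀ (t : List (List (String × String))) (x : List (String × String)),
    PySem.List.min? (x :: t) pvRank
    = match PySem.List.min? t pvRank with
      | none => some x
      | some m => if pvRank m < pvRank x then some m else some x := by
  intro t
  induction t with
  | nil => intro x; simp [PySem.List.min?]
  | cons y t ih =>
    intro x
    have hL : PySem.List.min? (x :: y :: t) pvRank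
        = PySem.List.min? ((if pvRank y < pvRank x then y else x) :: t) pvRank := by
      by_cases hxy : pvRank y < pvRank x <;>
        simp [PySem.List.min?, List.foldl_cons, hxy]
    rw [hL, ih, ih y]
    rcases hm : PySem.List.min? t pvRank with _ | m
    · by_cases hxy : pvRank y < pvRank x <;> simp [hxy]
    · by_cases hxy : pvRank y < pvRank x
      · by_cases hmy : pvRank m < pvRank y
        · have hmx : pvRank m < pvRank x := by omega
          simp [hxy, hmy, hmx]
        · simp [hxy, hmy]
      · by_cases hmy : pvRank m < pvRank y
        · by_cases hmx : pvRank m < pvRank x <;> simp [hxy, hmy, hmx]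
        · have hmx : ¬ pvRank m < pvRank x := by omega
          simp [hxy, hmy, hmx]

lemma pv_mem_of_A {t : List (List (String × String))} {p : String} {h : Bool}
    {m : List (String × String)} (hA : select_assembly t p h = some m) : m ∈ t := by
  unfold select_assembly at hA
  rcases hF0 : t.filter pvQ0 with _ | ⟨r0, t0⟩ <;> rw [hF0] at hA
  · rcases hF1 : t.filter pvQ1 with _ | ⟨r1, t1⟩ <;> rw [hF1] at hA
    · rcases hFT : t.filter pvQT with _ | ⟨rT, tT⟩ <;> rw [hFT] at hA
      · rcases t with _ | ⟨c, t'⟩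
        · simp at hA
        · simp at hA; simp [hA]
      · simp at hA
        have : rT ∈ t.filter pvQT := by rw [hFT]; exact List.mem_cons_self
        exact hA ▸ List.mem_of_mem_filter this
    · simp at hA
      have : r1 ∈ t.filter pvQ1 := by rw [hF1]; exact List.mem_cons_self
      exact hA ▸ List.mem_of_mem_filter this
  · simp at hA
    have : r0 ∈ t.filter pvQ0 := by rw [hF0]; exact List.mem_cons_self
    exact hA ▸ List.mem_of_mem_filter this

lemma pv_main : ∀ (c : List (List (String × String))) (p : String) (h : Bool),
    select_assembly c p h = select_assembly_alt c p h := by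
  intro c p h
  induction c with
  | nil => rfl
  | cons x t ih =>
    have halt : PySem.List.min? t pvRank = select_assembly t p h := ih.symm
    show select_assembly (x :: t) p h = PySem.List.min? (x :: t) pvRank
    rw [pv_min?_cons t x, halt]
    by_cases h0 : pvQ0 x = true
    · -- rank x = 0 : A returns x, min keeps x
      rcases hA : select_assembly t p h with _ | m <;>
        simp [select_assembly, List.filter_cons, h0, pvRank_eq0 h0]
    · have h0' : pvQ0 x = false := by simpa using h0
      by_cases h1 : pvQ1 x = true
      · -- rank x = 1
        have hx := pvRank_eq1 h1
        rcases hF0 : t.filter pvQ0 with _ | ⟨r0, t0⟩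
        · -- no reference genome in t → every A-result of t has rank ≥ 1 → keep x
          rcases hA : select_assembly t p h with _ | m
          · simp [select_assembly, List.filter_cons, h0', h1, hF0]
          · have hm : m ∈ t := pv_mem_of_A hA
            have hmq0 : pvQ0 m = false := by
              simpa using List.filter_eq_nil_iff.mp hF0 m hm
            have hnot : ¬ pvRank m < pvRank x := by
              have := pvRank_ge1 hmq0; rw [hx]; omega
            simp [select_assembly, List.filter_cons, h0', h1, hF0, hnot]
        · -- a reference genome exists in t → both return it
          have hr0 : pvQ0 r0 = true :=
            List.of_mem_filter (by rw [hF0]; exact List.mem_cons_self)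
          have hlt : pvRank r0 < pvRank x := by rw [pvRank_eq0 hr0, hx]; omega
          have hA : select_assembly t p h = some r0 := by
            simp [select_assembly, hF0]
          simp [select_assembly, List.filter_cons, h0', hF0, hA, hlt]
      · have h1' : pvQ1 x = false := by simpa using h1
        by_cases hT : pvQT x = true
        · -- rank x = 2
          have hx := pvRank_eq2 h0' h1' hT
          rcases hF0 : t.filter pvQ0 with _ | ⟨r0, t0⟩
          · rcases hF1 : t.filter pvQ1 with _ | ⟨r1, t1⟩
            · -- no tier-0/1 in t → any A-result of t has rank ≥ 2 → keep x
              rcases hA : select_assembly t p h with _ | m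
              · simp [select_assembly, List.filter_cons, h0', h1', hT, hF0, hF1]
              · have hm : m ∈ t := pv_mem_of_A hA
                have hmq0 : pvQ0 m = false := by
                  simpa using List.filter_eq_nil_iff.mp hF0 m hm
                have hmq1 : pvQ1 m = false := by
                  simpa using List.filter_eq_nil_iff.mp hF1 m hm
                have hnot : ¬ pvRank m < pvRank x := by
                  have := pvRank_ge2 hmq0 hmq1; rw [hx]; omega
                simp [select_assembly, List.filter_cons, h0', h1', hT, hF0, hF1, hnot]
            · have hr1 : pvQ1 r1 = true :=
                List.of_mem_filter (by rw [hF1]; exact List.mem_cons_self)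
              have hlt : pvRank r1 < pvRank x := by rw [pvRank_eq1 hr1, hx]; omega
              have hA : select_assembly t p h = some r1 := by
                simp [select_assembly, hF0, hF1]
              simp [select_assembly, List.filter_cons, h0', h1', hF0, hF1, hA, hlt]
          · have hr0 : pvQ0 r0 = true :=
              List.of_mem_filter (by rw [hF0]; exact List.mem_cons_self)
            have hlt : pvRank r0 < pvRank x := by rw [pvRank_eq0 hr0, hx]; omega
            have hA : select_assembly t p h = some r0 := by
              simp [select_assembly, hF0]
            simp [select_assembly, List.filter_cons, h0', hF0, hA, hlt]
        · -- rank x = 3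
          have hT' : pvQT x = false := by simpa using hT
          have hx := pvRank_eq3 h0' h1' hT'
          rcases hF0 : t.filter pvQ0 with _ | ⟨r0, t0⟩
          · rcases hF1 : t.filter pvQ1 with _ | ⟨r1, t1⟩
            · rcases hFT : t.filter pvQT with _ | ⟨rT, tT⟩
              · -- everything in t has rank 3 → keep x
                rcases hA : select_assembly t p h with _ | m
                · simp [select_assembly, List.filter_cons, h0', h1', hT', hF0, hF1, hFT]
                · have hm : m ∈ t := pv_mem_of_A hA
                  have hmq0 : pvQ0 m = false := by
                    simpa using List.filter_eq_nil_iff.mp hF0 m hm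
                  have hmq1 : pvQ1 m = false := by
                    simpa using List.filter_eq_nil_iff.mp hF1 m hm
                  have hmqT : pvQT m = false := by
                    simpa using List.filter_eq_nil_iff.mp hFT m hm
                  have hnot : ¬ pvRank m < pvRank x := by
                    rw [pvRank_eq3 hmq0 hmq1 hmqT, hx]; omega
                  simp [select_assembly, List.filter_cons, h0', h1', hT', hF0, hF1, hFT, hnot]
              · have hmemf : rT ∈ t.filter pvQT := by rw [hFT]; exact List.mem_cons_self
                have hrT : pvQT rT = true := List.of_mem_filter hmemf
                have hmem : rT ∈ t := List.mem_of_mem_filter hmemf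
                have hrT0 : pvQ0 rT = false := by
                  simpa using List.filter_eq_nil_iff.mp hF0 rT hmem
                have hrT1 : pvQ1 rT = false := by
                  simpa using List.filter_eq_nil_iff.mp hF1 rT hmem
                have hlt : pvRank rT < pvRank x := by
                  rw [pvRank_eq2 hrT0 hrT1 hrT, hx]; omega
                have hA : select_assembly t p h = some rT := by
                  simp [select_assembly, hF0, hF1, hFT]
                simp [select_assembly, List.filter_cons, h0', h1', hT', hF0, hF1, hFT, hA, hlt]
            · have hr1 : pvQ1 r1 = true :=
                List.of_mem_filter (by rw [hF1]; exact List.mem_cons_self)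
              have hlt : pvRank r1 < pvRank x := by rw [pvRank_eq1 hr1, hx]; omega
              have hA : select_assembly t p h = some r1 := by
                simp [select_assembly, hF0, hF1]
              simp [select_assembly, List.filter_cons, h0', h1', hF0, hF1, hA, hlt]
          · have hr0 : pvQ0 r0 = true :=
              List.of_mem_filter (by rw [hF0]; exact List.mem_cons_self)
            have hlt : pvRank r0 < pvRank x := by rw [pvRank_eq0 hr0, hx]; omega
            have hA : select_assembly t p h = some r0 := by
              simp [select_assembly, hF0]
            simp [select_assembly, List.filter_cons, h0', hF0, hA, hlt]

-- ===== VERDICT (by name: the statement is the Claim_ definition above) =====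
theorem select_assembly_spec : Claim_equal_select_assembly := by
  intro c p h _
  unfold Spec_select_assembly
  exact pv_main c p h
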